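-- pv_equiv track=rewrite | github.com/yourlastnamesoundslikeatypeofpasta/crawler | scripts/find_abs_path.py | find_abs_path
-- ===== SOURCE A (Python) =====
-- def find_abs_path(link, rel_link):
--     """
--     Find the new_urls from a relative link that uses 'dots'. ex. '../../directory/index.html'
--     :param link: The current new_urls where the relative link was found
--             ex. 'http://books.toscrape.com/catalogue/category/books/travel_2/index.html'
--     :param rel_link: A relative link that includes 'dots'. ex. '../../directory/index.html'
--     :return:
--     """
--     link_list = link.split('/')
--     del link_list[-1]  # remove the trailing .html file from the path
--     rel_link_list = rel_link.split('/')
--     new_link_list = []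
--     for dot_dot in rel_link_list:
--         if dot_dot == '..':
--             del link_list[-1]
--             continue
--         new_link_list.append(dot_dot)
--     resolved_link = '/'.join(link_list) + '/' + '/'.join(new_link_list)
--
--     # TESTING FOLLOWING CODE BLOCK
--     # ADDING THE MIDDLE FOREWORD SLASH IF IT ISN'T THERE
--     # resolved_link = '/'.join(link_list)
--     # if not resolved_link.endswith('/'):
--     #     resolved_link = resolved_link + '/'
--     # resolved_link + '/'.join(new_link_list)
--     # NOT WORKING!!
--
--     return resolved_link
-- ===== SOURCE B (Python) =====
-- def find_abs_path(link, rel_link):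
--     rel_parts = rel_link.split('/')
--     keep = [seg for seg in rel_parts if seg != '..']
--     dots = len(rel_parts) - len(keep)
--     base = link.split('/')[:-1]
--     base = base[:max(len(base) - dots, 0)]
--     return '/'.join(base) + '/' + '/'.join(keep)
-- ===== Notes on version B (the rewrite author's own statement) =====
-- stated objective: simpler
-- what changed: A's single interleaved loop that pops the base on '..' and appends other segments is replaced by a filter pass keeping the non-'..' segments, a separate dot count, and one slice trimming the base by that count.
import Mathlib
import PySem

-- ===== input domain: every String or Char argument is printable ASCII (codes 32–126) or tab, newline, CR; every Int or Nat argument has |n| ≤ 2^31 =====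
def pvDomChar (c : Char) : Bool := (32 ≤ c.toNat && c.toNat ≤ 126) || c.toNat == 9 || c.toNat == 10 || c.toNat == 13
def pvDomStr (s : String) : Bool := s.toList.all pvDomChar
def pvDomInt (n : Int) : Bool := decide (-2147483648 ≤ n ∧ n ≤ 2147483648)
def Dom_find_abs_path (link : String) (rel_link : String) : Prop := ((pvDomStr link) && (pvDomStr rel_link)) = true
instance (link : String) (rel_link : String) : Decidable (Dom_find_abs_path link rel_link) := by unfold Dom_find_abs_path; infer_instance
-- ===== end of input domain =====

-- B replaces A's interleaved pop-or-append loop by a filter pass plus a separate count-and-trim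
-- slice (objective: simpler; return value only, neither version mutates its arguments).

-- ===== PORT A =====
-- the for-loop of A: pop the base on '..' (none = IndexError), else append the segment
def findAbsLoopA : List (List Char) → List (List Char) → List (List Char) →
    Option (List (List Char) × List (List Char))
  | [], base, acc => some (base, acc)
  | s :: rest, base, acc =>
    if s == ['.', '.'] then
      match PySem.List.pop? base with
      | none => none
      | some (_, base') => findAbsLoopA rest base' acc
    else
      findAbsLoopA rest base (acc ++ [s])

def find_abs_path (link : String) (rel_link : String) : String :=
  match PySem.List.pop? (PySem.Chars.splitOn link.toList ['/']) with
  | none => ""  -- unreachable: str.split never returns an empty list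
  | some (_, link_list) =>
    match findAbsLoopA (PySem.Chars.splitOn rel_link.toList ['/']) link_list [] with
    | none => ""  -- IndexError in Python: these inputs are excluded by Pre_
    | some (base, keep) =>
        String.ofList (PySem.Chars.join ['/'] base ++ ['/'] ++ PySem.Chars.join ['/'] keep)

-- ===== PORT B =====
def find_abs_path_alt (link : String) (rel_link : String) : String :=
  let rel := PySem.Chars.splitOn rel_link.toList ['/']
  let keep := rel.filter (fun s => s != ['.', '.'])
  let dots : Int := (rel.length : Int) - (keep.length : Int)
  let base0 := PySem.List.slice (PySem.Chars.splitOn link.toList ['/']) none (some (-1))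
  let base := PySem.List.slice base0 none (some (max ((base0.length : Int) - dots) 0))
  String.ofList (PySem.Chars.join ['/'] base ++ ['/'] ++ PySem.Chars.join ['/'] keep)

-- ===== PRECONDITION & SPEC =====
-- Pre_ excludes exactly the inputs where A raises IndexError: more '..' segments in rel_link
-- than path segments left in link after dropping the last one.
def Pre_find_abs_path (link : String) (rel_link : String) : Prop :=
  (PySem.Chars.splitOn rel_link.toList ['/']).count ['.', '.'] + 1 ≤
    (PySem.Chars.splitOn link.toList ['/']).length
instance (link : String) (rel_link : String) : Decidable (Pre_find_abs_path link rel_link) := by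
  unfold Pre_find_abs_path; infer_instance

def pvWitness_find_abs_path : String × String := ("http://h/a/b.html", "../c/d.html")

def Spec_find_abs_path (link : String) (rel_link : String) (out : String) : Prop :=
  out = find_abs_path_alt link rel_link
instance (link : String) (rel_link : String) (out : String) :
    Decidable (Spec_find_abs_path link rel_link out) := by
  unfold Spec_find_abs_path; infer_instance

-- ===== CLAIM (what is proved, stated in full; the proofs are below) =====
def Claim_equal_find_abs_path : Prop := ∀ (link : String) (rel_link : String),
  Dom_find_abs_path link rel_link → Pre_find_abs_path link rel_link →
  Spec_find_abs_path link rel_link (find_abs_path link rel_link)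

-- ===== LEMMAS AND PROOFS =====

-- A's loop, characterised: when the '..' count fits in the base, it returns the base with that
-- many last elements dropped, and the non-'..' segments appended to the accumulator.
theorem findAbsLoopA_eq (segs : List (List Char)) (base acc : List (List Char))
    (h : segs.count ['.', '.'] ≤ base.length) :
    findAbsLoopA segs base acc =
      some (base.take (base.length - segs.count ['.', '.']),
            acc ++ segs.filter (fun s => s != ['.', '.'])) := by
  induction segs generalizing base acc with
  | nil => simp [findAbsLoopA]
  | cons s rest ih =>
    by_cases hs : s = ['.', '.']
    · subst hs
      rw [List.count_cons_self] at h
      obtain ⟨init, x, hbx⟩ := (List.eq_nil_or_concat base).resolve_left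
        (by intro hnil; subst hnil; simp at h)
      rw [List.concat_eq_append] at hbx
      subst hbx
      have hcnt : rest.count ['.', '.'] ≤ init.length := by
        simp [List.length_append] at h; omega
      simp only [findAbsLoopA, beq_self_eq_true, if_true]
      rw [PySem.List.pop?_last]
      simp only []
      rw [ih init acc hcnt]
      have hfil : (List.filter (fun s => s != ['.', '.']) (['.', '.'] :: rest)) =
          List.filter (fun s => s != ['.', '.']) rest := by simp
      have hn : (init ++ [x]).length - List.count ['.', '.'] (['.', '.'] :: rest) =
          init.length - List.count ['.', '.'] rest := by
        simp only [List.length_append, List.length_cons, List.length_nil, List.count_cons_self]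
        omega
      rw [hfil, hn, List.take_append_of_le_length (by omega)]
    · have hcnt : rest.count ['.', '.'] ≤ base.length := by
        rw [List.count_cons_of_ne hs] at h; exact h
      simp only [findAbsLoopA, beq_iff_eq, if_neg hs]
      rw [ih base (acc ++ [s]) hcnt]
      have hfil : (List.filter (fun t => t != ['.', '.']) (s :: rest)) =
          s :: List.filter (fun t => t != ['.', '.']) rest := by
        rw [List.filter_cons, if_pos (by simp [hs])]
      rw [hfil, List.count_cons_of_ne hs]
      simp

theorem length_filter_ne (l : List (List Char)) :
    (l.filter (fun s => s != ['.', '.'])).length = l.length - l.count ['.', '.'] := by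
  induction l with
  | nil => simp
  | cons s rest ih =>
    have hle : rest.count ['.', '.'] ≤ rest.length := List.count_le_length
    by_cases hs : s = ['.', '.']
    · subst hs
      simp only [List.count_cons_self, List.filter_cons, bne_self_eq_false, Bool.false_eq_true,
        if_false, ih, List.length_cons]
      omega
    · simp only [List.filter_cons, List.count_cons_of_ne hs, List.length_cons]
      rw [if_pos (by simp [hs])]
      simp only [List.length_cons, ih]
      omega

theorem find_abs_path_spec : Claim_equal_find_abs_path := by
  intro link rel_link _ hpre
  unfold Spec_find_abs_path find_abs_path find_abs_path_alt
  unfold Pre_find_abs_path at hpre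
  have hLne : PySem.Chars.splitOn link.toList ['/'] ≠ [] := by
    intro hnil; rw [hnil] at hpre; simp at hpre
  obtain ⟨init, x, hLx⟩ := (List.eq_nil_or_concat _).resolve_left hLne
  rw [List.concat_eq_append] at hLx
  rw [hLx] at hpre ⊢
  have hcnt : (PySem.Chars.splitOn rel_link.toList ['/']).count ['.', '.'] ≤ init.length := by
    simp [List.length_append] at hpre; omega
  rw [PySem.List.pop?_last]
  simp only []
  rw [findAbsLoopA_eq _ init [] hcnt]
  simp only [List.nil_append]
  rw [PySem.List.slice_to_neg_one]
  have hdl : (init ++ [x]).dropLast = init := by simp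
  rw [hdl]
  have hklen := length_filter_ne (PySem.Chars.splitOn rel_link.toList ['/'])
  have hcle : (PySem.Chars.splitOn rel_link.toList ['/']).count ['.', '.'] ≤
      (PySem.Chars.splitOn rel_link.toList ['/']).length := List.count_le_length
  have hm : max ((init.length : Int) -
      (((PySem.Chars.splitOn rel_link.toList ['/']).length : Int) -
        (((PySem.Chars.splitOn rel_link.toList ['/']).filter (fun s => s != ['.', '.'])).length : Int))) 0 =
      ((init.length - (PySem.Chars.splitOn rel_link.toList ['/']).count ['.', '.'] : Nat) : Int) := by
    rw [hklen]; omega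
  rw [hm, PySem.List.slice_to _ (by exact_mod_cast Int.natCast_nonneg _)]
  simp
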